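-- pv_equiv track=rewrite | github.com/fdac21/youtubeClickbait | analysis.py | encode_titles
-- ===== SOURCE A (Python) =====
-- def encode_titles(titles)-> list:
--     t_dict = {}
--
--     uid = 0
--     for entry in titles:
--         words = entry.split(' ')
--
--         for word in words:
--             uid += 1
--             if word not in t_dict.keys():
--                 t_dict[word] = uid
--
--     ret = []
--     for entry in titles:
--         words = entry.split(' ')
--         tmp = ''
--         for word in words:
--             if word in t_dict.keys():
--                 tmp+=str(t_dict[word])
--         ret.append(tmp)
--     return ret
-- ===== SOURCE B (Python) =====
-- def encode_titles(titles) -> list: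
--     # Single fused pass: assign first-occurrence ids and build each encoded
--     # string in the same traversal (A makes two passes over titles).
--     t_dict = {}
--     uid = 0
--     ret = []
--     for entry in titles:
--         tmp = ''
--         for word in entry.split(' '):
--             uid += 1
--             if word not in t_dict:
--                 t_dict[word] = uid
--             tmp += str(t_dict[word])
--         ret.append(tmp)
--     return ret
-- ===== Notes on version B (the rewrite author's own statement) =====
-- stated objective: simpler
-- what changed: The two traversals of titles (id-assignment pass, then encoding pass) are fused into one loop that assigns ids and builds each title's encoded string simultaneously; the second pass's membership test disappears because every word's id is already final when it is encoded.
import Mathlib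
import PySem

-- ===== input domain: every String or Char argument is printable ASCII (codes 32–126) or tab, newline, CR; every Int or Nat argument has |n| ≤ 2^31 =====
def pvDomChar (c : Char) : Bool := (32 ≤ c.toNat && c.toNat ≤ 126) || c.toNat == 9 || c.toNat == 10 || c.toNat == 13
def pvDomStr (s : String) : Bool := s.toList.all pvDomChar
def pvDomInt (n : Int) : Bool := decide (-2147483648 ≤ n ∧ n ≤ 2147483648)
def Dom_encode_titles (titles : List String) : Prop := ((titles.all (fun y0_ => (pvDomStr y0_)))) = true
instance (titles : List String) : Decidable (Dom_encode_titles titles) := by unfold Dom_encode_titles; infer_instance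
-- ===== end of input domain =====

-- B fuses A's two passes over `titles` into one loop that assigns ids and builds each
-- encoded string simultaneously (same return value; no observable side effects).

-- ===== PORT A =====
-- entry.split(' '): sep is nonempty, so split? always returns some (exact)
def splitSp (s : String) : List String := (PySem.Str.split? s " ").getD []

-- first pass, inner word loop: uid += 1; if word not in t_dict: t_dict[word] = uid
def encA_word (st : PySem.Dict String Int × Int) (word : String) :
    PySem.Dict String Int × Int :=
  let uid := st.2 + 1
  if st.1.contains word then (st.1, uid) else (st.1.insert word uid, uid)

-- first pass over titles
def encA_pass1 (titles : List String) : PySem.Dict String Int × Int :=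
  titles.foldl (fun st entry => (splitSp entry).foldl encA_word st)
    (PySem.Dict.empty, 0)

-- second pass, one entry: the `in` branch guarantees the key is present, so
-- `t_dict[word]` is exactly `getD word 0` there
def encA_entry (d : PySem.Dict String Int) (entry : String) : String :=
  (splitSp entry).foldl
    (fun tmp word => if d.contains word then tmp ++ PySem.Int.toStr (d.getD word 0) else tmp) ""

def encode_titles (titles : List String) : List String :=
  let d := (encA_pass1 titles).1
  titles.foldl (fun ret entry => ret ++ [encA_entry d entry]) []

-- ===== PORT B =====
-- entry.split(' ') on B's side (sep nonempty, split? exact)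
def splitSpB (s : String) : List String := (PySem.Str.split? s " ").getD []

-- fused inner word loop: state ((t_dict, uid), tmp)
def encB_word (st : (PySem.Dict String Int × Int) × String) (word : String) :
    (PySem.Dict String Int × Int) × String :=
  let uid := st.1.2 + 1
  let d := if st.1.1.contains word then st.1.1 else st.1.1.insert word uid
  ((d, uid), st.2 ++ PySem.Int.toStr (d.getD word 0))

-- fused outer loop: state ((t_dict, uid), ret)
def encB_entry (st : (PySem.Dict String Int × Int) × List String) (entry : String) :
    (PySem.Dict String Int × Int) × List String :=
  let r := (splitSpB entry).foldl encB_word (st.1, "")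
  (r.1, st.2 ++ [r.2])

def encode_titles_alt (titles : List String) : List String :=
  (titles.foldl encB_entry ((PySem.Dict.empty, 0), [])).2

-- ===== PRECONDITION & SPEC =====
def Spec_encode_titles (titles : List String) (out : List String) : Prop := out = encode_titles_alt titles
instance (titles : List String) (out : List String) : Decidable (Spec_encode_titles titles out) := by unfold Spec_encode_titles; infer_instance

-- ===== CLAIM =====
def Claim_equal_encode_titles : Prop := ∀ (titles : List String), Dom_encode_titles titles → Spec_encode_titles titles (encode_titles titles)

-- ===== LEMMAS AND PROOFS =====
-- `submap d d'`: every binding of d is a binding of d' (ids are never overwritten)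
def submap (d d' : PySem.Dict String Int) : Prop :=
  ∀ k v, d.get? k = some v → d'.get? k = some v

lemma submap_refl (d : PySem.Dict String Int) : submap d d := fun _ _ h => h

lemma submap_trans {a b c : PySem.Dict String Int} (h1 : submap a b) (h2 : submap b c) :
    submap a c := fun k v h => h2 k v (h1 k v h)

lemma submap_word (st : PySem.Dict String Int × Int) (w : String) :
    submap st.1 (encA_word st w).1 := by
  intro k v h
  unfold encA_word
  by_cases hc : st.1.contains w = true
  · simp [hc, h]
  · simp only [Bool.not_eq_true] at hc
    have hkw : k ≠ w := by
      intro he; subst he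
      rw [PySem.Dict.contains_eq_isSome_get?, h] at hc; simp at hc
    simp [hc, PySem.Dict.get?_insert_of_ne _ _ hkw, h]

lemma submap_words (ws : List String) : ∀ st : PySem.Dict String Int × Int,
    submap st.1 (ws.foldl encA_word st).1 := by
  induction ws with
  | nil => intro st; exact submap_refl _
  | cons w ws ih =>
    intro st
    exact submap_trans (submap_word st w) (ih (encA_word st w))

lemma submap_titles (ts : List String) : ∀ st : PySem.Dict String Int × Int,
    submap st.1 ((ts.foldl (fun st entry => (splitSp entry).foldl encA_word st) st)).1 := by
  induction ts with
  | nil => intro st; exact submap_refl _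
  | cons e ts ih =>
    intro st
    exact submap_trans (submap_words (splitSp e) st)
      (ih ((splitSp e).foldl encA_word st))

-- the id B reads for a word is a binding of B's current dict
lemma word_binding (st : PySem.Dict String Int × Int) (w : String) :
    (encA_word st w).1.get? w = some ((encA_word st w).1.getD w 0) := by
  unfold encA_word
  by_cases hc : st.1.contains w = true
  · simp only [hc, if_true]
    rw [PySem.Dict.contains_eq_isSome_get?] at hc
    cases hg : st.1.get? w with
    | none => rw [hg] at hc; simp at hc
    | some v => simp [hg, PySem.Dict.getD_eq_get?_getD]  -- getD = v
  · simp [hc, PySem.Dict.get?_insert_self, PySem.Dict.getD_eq_get?_getD]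

-- fused inner loop = A's first-pass inner loop paired with A's second-pass encoding
-- against any dict extending the post-entry dict
lemma entry_eq (dF : PySem.Dict String Int) (ws : List String) :
    ∀ (st : PySem.Dict String Int × Int) (tmp : String),
    submap (ws.foldl encA_word st).1 dF →
    ws.foldl encB_word (st, tmp) =
      (ws.foldl encA_word st,
       ws.foldl (fun t w => if dF.contains w then t ++ PySem.Int.toStr (dF.getD w 0) else t) tmp) := by
  induction ws with
  | nil => intro st tmp _; rfl
  | cons w ws ih =>
    intro st tmp hsub
    have hstep : encB_word (st, tmp) w =
        (encA_word st w, tmp ++ PySem.Int.toStr ((encA_word st w).1.getD w 0)) := by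
      unfold encB_word encA_word
      by_cases hc : st.1.contains w = true <;> simp [hc]
    have hbind := word_binding st w
    have hsub' : submap (ws.foldl encA_word (encA_word st w)).1 dF := by
      simpa [List.foldl_cons] using hsub
    have hF : dF.get? w = some ((encA_word st w).1.getD w 0) :=
      hsub' w _ (submap_words ws (encA_word st w) w _ hbind)
    have hFc : dF.contains w = true := by
      rw [PySem.Dict.contains_eq_isSome_get?, hF]; rfl
    have hFv : dF.getD w 0 = (encA_word st w).1.getD w 0 := by
      rw [PySem.Dict.getD_eq_get?_getD, hF]; rfl
    calc (w :: ws).foldl encB_word (st, tmp)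
        = ws.foldl encB_word (encA_word st w,
            tmp ++ PySem.Int.toStr ((encA_word st w).1.getD w 0)) := by
          rw [List.foldl_cons, hstep]
      _ = _ := by
          rw [ih (encA_word st w) _ hsub', List.foldl_cons]
          simp [hFc, hFv]

-- fused outer loop = A's first pass paired with mapping A's per-entry encoder
lemma main_eq (dF : PySem.Dict String Int) (ts : List String) :
    ∀ (st : PySem.Dict String Int × Int) (acc : List String),
    submap ((ts.foldl (fun st entry => (splitSp entry).foldl encA_word st) st)).1 dF →
    ts.foldl encB_entry (st, acc) =
      (ts.foldl (fun st entry => (splitSp entry).foldl encA_word st) st,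
       acc ++ ts.map (encA_entry dF)) := by
  induction ts with
  | nil => intro st acc _; simp
  | cons e ts ih =>
    intro st acc hsub
    have hsub1 : submap ((ts.foldl (fun st entry => (splitSp entry).foldl encA_word st)
        ((splitSp e).foldl encA_word st))).1 dF := by
      simpa [List.foldl_cons] using hsub
    have hsubE : submap ((splitSp e).foldl encA_word st).1 dF :=
      submap_trans (submap_titles ts ((splitSp e).foldl encA_word st)) hsub1
    have hE := entry_eq dF (splitSp e) st "" hsubE
    have hstep : encB_entry (st, acc) e =
        ((splitSp e).foldl encA_word st, acc ++ [encA_entry dF e]) := by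
      unfold encB_entry
      rw [show splitSpB e = splitSp e from rfl, hE]; rfl
    rw [List.foldl_cons, hstep, ih _ _ hsub1, List.foldl_cons]
    simp

lemma foldl_append_map (f : String → String) (ts : List String) :
    ∀ acc : List String, ts.foldl (fun ret e => ret ++ [f e]) acc = acc ++ ts.map f := by
  induction ts with
  | nil => intro acc; simp
  | cons e ts ih => intro acc; simp [List.foldl_cons, ih]

-- ===== VERDICT =====
theorem encode_titles_spec : Claim_equal_encode_titles := by
  intro titles _
  unfold Spec_encode_titles encode_titles encode_titles_alt encA_pass1
  rw [main_eq _ titles ((PySem.Dict.empty : PySem.Dict String Int), (0 : Int)) []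
    (submap_refl _), foldl_append_map]
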